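-- pv_equiv track=rewrite | github.com/aoshen524/verl | verl/experimental/agent_loop/preprocessed_multimodal.py | _find_token_runs
-- ===== SOURCE A (Python) =====
-- from collections.abc import Mapping, Sequence
--
-- def _find_token_runs(prompt_ids: Sequence[int], token_id: int) -> list[tuple[int, int]]:
--     runs: list[tuple[int, int]] = []
--     idx = 0
--     while idx < len(prompt_ids):
--         if prompt_ids[idx] != token_id:
--             idx += 1
--             continue
--         start = idx
--         while idx < len(prompt_ids) and prompt_ids[idx] == token_id:
--             idx += 1
--         runs.append((start, idx - start))
--     return runs
-- ===== SOURCE B (Python) =====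
-- from itertools import groupby
--
-- def _find_token_runs(prompt_ids, token_id):
--     runs = []
--     offset = 0
--     for key, group in groupby(prompt_ids):
--         length = sum(1 for _ in group)
--         if key == token_id:
--             runs.append((offset, length))
--         offset += length
--     return runs
-- ===== Notes on version B (the rewrite author's own statement) =====
-- stated objective: idiomatic
-- what changed: Replaces the index-based nested while loops with itertools.groupby partitioning the list into maximal equal runs, collecting (offset, length) for groups equal to token_id while advancing a running offset.
import Mathlib
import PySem

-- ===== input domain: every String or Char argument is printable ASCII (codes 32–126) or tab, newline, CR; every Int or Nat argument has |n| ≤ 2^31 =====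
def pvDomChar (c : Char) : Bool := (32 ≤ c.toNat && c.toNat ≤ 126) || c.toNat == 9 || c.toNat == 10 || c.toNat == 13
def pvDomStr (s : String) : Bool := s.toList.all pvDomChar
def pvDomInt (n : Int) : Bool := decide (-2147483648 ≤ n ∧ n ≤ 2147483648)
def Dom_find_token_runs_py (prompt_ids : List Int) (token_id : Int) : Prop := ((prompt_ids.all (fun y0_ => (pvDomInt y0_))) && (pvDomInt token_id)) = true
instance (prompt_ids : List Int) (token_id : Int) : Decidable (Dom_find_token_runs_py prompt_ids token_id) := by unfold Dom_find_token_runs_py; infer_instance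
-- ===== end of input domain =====

-- B replaces A's index-based nested while loops with a groupby-style decomposition
-- into maximal runs of equal values (idiomatic; same O(n) cost; return value only).
-- Both while loops are ported with a fuel parameter that only makes them total
-- (fuel is always sufficient at the call sites; the computation is unchanged).

-- ===== PORT A =====
-- inner 'while idx < len(prompt_ids) and prompt_ids[idx] == token_id: idx += 1'
def pvScanRun (xs : List Int) (tok : Int) : Nat → Nat → Nat
  | 0, idx => idx
  | fuel + 1, idx =>
    if idx < xs.length ∧ xs.getD idx 0 = tok then pvScanRun xs tok fuel (idx + 1) else idx

-- outer 'while idx < len(prompt_ids): …'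
def pvOuter (xs : List Int) (tok : Int) : Nat → Nat → List (Int × Int)
  | 0, _ => []
  | fuel + 1, idx =>
    if idx < xs.length then
      if xs.getD idx 0 ≠ tok then pvOuter xs tok fuel (idx + 1)
      else
        let j := pvScanRun xs tok (xs.length - idx) idx
        ((idx : Int), ((j - idx : Nat) : Int)) :: pvOuter xs tok fuel j
    else []

def find_token_runs_py (prompt_ids : List Int) (token_id : Int) : List (Int × Int) :=
  pvOuter prompt_ids token_id (prompt_ids.length + 1) 0

-- ===== PORT B =====
-- groupby: peel the maximal run of the head value, advance the offset by its length
def pvAltGo (tok : Int) : Nat → List Int → Nat → List (Int × Int)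
  | 0, _, _ => []
  | _ + 1, [], _ => []
  | fuel + 1, x :: rest, off =>
    let len := (rest.takeWhile (· == x)).length + 1
    let rest' := rest.dropWhile (· == x)
    if x = tok then ((off : Int), (len : Int)) :: pvAltGo tok fuel rest' (off + len)
    else pvAltGo tok fuel rest' (off + len)

def find_token_runs_py_alt (prompt_ids : List Int) (token_id : Int) : List (Int × Int) :=
  pvAltGo token_id prompt_ids.length prompt_ids 0

-- ===== PRECONDITION & SPEC =====
def Spec_find_token_runs_py (prompt_ids : List Int) (token_id : Int) (out : List (Int × Int)) : Prop := out = find_token_runs_py_alt prompt_ids token_id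
instance (prompt_ids : List Int) (token_id : Int) (out : List (Int × Int)) : Decidable (Spec_find_token_runs_py prompt_ids token_id out) := by unfold Spec_find_token_runs_py; infer_instance

-- ===== CLAIM (what is proved, stated in full; the proofs are below) =====
def Claim_equal_find_token_runs_py : Prop := ∀ (prompt_ids : List Int) (token_id : Int), Dom_find_token_runs_py prompt_ids token_id → Spec_find_token_runs_py prompt_ids token_id (find_token_runs_py prompt_ids token_id)

-- ===== LEMMAS AND PROOFS =====

-- pvScanRun with enough fuel counts the maximal run of tok starting at idx
theorem pvScanRun_eq (xs : List Int) (tok : Int) :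
    ∀ (fuel idx : Nat), xs.length - idx ≤ fuel →
      pvScanRun xs tok fuel idx = idx + ((xs.drop idx).takeWhile (· == tok)).length := by
  intro fuel
  induction fuel with
  | zero =>
    intro idx hf
    rw [pvScanRun, List.drop_eq_nil_of_le (by omega)]
    simp
  | succ fuel ih =>
    intro idx hf
    rw [pvScanRun]
    split
    · rename_i h
      have hd : xs.drop idx = xs[idx] :: xs.drop (idx + 1) := List.drop_eq_getElem_cons h.1
      have hget : xs[idx] = tok := by
        have := h.2; rwa [List.getD_eq_getElem xs 0 h.1] at this
      rw [ih (idx + 1) (by omega), hd, hget, List.takeWhile_cons]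
      simp
      omega
    · rename_i h
      by_cases hl : idx < xs.length
      · have hget : xs.getD idx 0 ≠ tok := fun hc => h ⟨hl, hc⟩
        have hd : xs.drop idx = xs[idx] :: xs.drop (idx + 1) := List.drop_eq_getElem_cons hl
        have hne : xs[idx] ≠ tok := by rwa [List.getD_eq_getElem xs 0 hl] at hget
        rw [hd, List.takeWhile_cons]
        simp [hne]
      · rw [List.drop_eq_nil_of_le (by omega)]
        simp

-- dropWhile is drop of the takeWhile length (local helper; no such lemma in scope)
theorem pvDropWhile_eq_drop (p : Int → Bool) (l : List Int) :
    l.dropWhile p = l.drop (l.takeWhile p).length := by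
  induction l with
  | nil => rfl
  | cons a l ih =>
    by_cases h : p a
    · simp [List.dropWhile_cons, h, ih]
    · simp [List.dropWhile_cons, h]

-- pvAltGo does not depend on the fuel once it covers the list length
theorem pvAltGo_fuel (tok : Int) :
    ∀ (f f' : Nat) (l : List Int) (off : Nat), l.length ≤ f → l.length ≤ f' →
      pvAltGo tok f l off = pvAltGo tok f' l off := by
  intro f
  induction f with
  | zero =>
    intro f' l off hf hf'
    have : l = [] := by cases l <;> simp_all
    subst this
    cases f' <;> rfl
  | succ f ih =>
    intro f' l off hf hf'
    match l, f' with
    | [], f' => cases f' <;> rfl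
    | x :: rest, f' + 1 =>
      simp only [pvAltGo]
      have hlen : (rest.dropWhile (· == x)).length ≤ rest.length :=
        List.length_dropWhile_le _ _
      simp only [List.length_cons] at hf hf'
      rw [ih f' (rest.dropWhile (· == x)) _ (by omega) (by omega)]

-- skipping a non-matching element one at a time agrees with skipping its whole group
theorem pvAltGo_cons_ne (x : Int) (rest : List Int) (tok : Int) (off : Nat) (hx : x ≠ tok) :
    pvAltGo tok (rest.length + 1) (x :: rest) off = pvAltGo tok rest.length rest (off + 1) := by
  match rest with
  | [] => simp [pvAltGo, hx]
  | z :: r =>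
    by_cases hz : z = x
    · subst hz
      simp only [List.length_cons, pvAltGo, if_neg hx, List.takeWhile_cons,
        List.dropWhile_cons, beq_self_eq_true, if_true]
      have hlen : (r.dropWhile (· == z)).length ≤ r.length := List.length_dropWhile_le _ _
      rw [pvAltGo_fuel tok (r.length + 1) r.length _ _ (by omega) (by omega)]
      congr 1
      omega
    · have hb : (z == x) = false := by simp [hz]
      simp only [List.length_cons, pvAltGo, if_neg hx, List.takeWhile_cons,
        List.dropWhile_cons, hb, Bool.false_eq_true, if_false, List.length_nil]

-- main bridge: the outer index loop at position i equals the group loop on the suffix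
theorem pvOuter_eq_altGo (xs : List Int) (tok : Int) :
    ∀ (f i : Nat), xs.length + 1 - i ≤ f →
      pvOuter xs tok f i = pvAltGo tok (xs.drop i).length (xs.drop i) i := by
  intro f
  induction f with
  | zero =>
    intro i hf
    have hge : xs.length < i := by omega
    rw [pvOuter, List.drop_eq_nil_of_le (by omega)]
    rfl
  | succ f ih =>
    intro i hf
    rw [pvOuter]
    split
    · rename_i h
      have hd : xs.drop i = xs[i] :: xs.drop (i + 1) := List.drop_eq_getElem_cons h
      by_cases hx : xs.getD i 0 = tok
      · rw [if_neg (by simpa using hx)]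
        have hget : xs[i] = tok := by rwa [List.getD_eq_getElem xs 0 h] at hx
        have hscan := pvScanRun_eq xs tok (xs.length - i) i (by omega)
        show ((i : Int), ((pvScanRun xs tok (xs.length - i) i - i : Nat) : Int)) ::
            pvOuter xs tok f (pvScanRun xs tok (xs.length - i) i)
            = pvAltGo tok (xs.drop i).length (xs.drop i) i
        have hlen : (List.takeWhile (· == tok) (xs.drop i)).length
            = (List.takeWhile (· == tok) (xs.drop (i + 1))).length + 1 := by
          rw [hd, hget, List.takeWhile_cons]; simp
        set j := pvScanRun xs tok (xs.length - i) i with hj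
        have htwlen : (List.takeWhile (· == tok) (xs.drop i)).length ≤ (xs.drop i).length :=
          (List.takeWhile_sublist _).length_le
        have hdlen : (xs.drop i).length = xs.length - i := List.length_drop ..
        have hilt : i < j := by omega
        have hjle : j ≤ xs.length := by omega
        rw [ih j (by omega)]
        have htw : ((xs.drop (i + 1)).takeWhile (· == tok)).length = j - i - 1 := by omega
        have hdw : (xs.drop (i + 1)).dropWhile (· == tok) = xs.drop j := by
          rw [pvDropWhile_eq_drop, htw, List.drop_drop]
          congr 1
          omega
        have e1 : j - i = ((xs.drop (i + 1)).takeWhile (· == tok)).length + 1 := by omega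
        have e2 : i + (((xs.drop (i + 1)).takeWhile (· == tok)).length + 1) = j := by omega
        have e3 : (xs.drop i).length = (xs.drop (i + 1)).length + 1 := by rw [hd]; rfl
        have hfl : (xs.drop j).length ≤ (xs.drop (i + 1)).length := by
          simp only [List.length_drop]
          omega
        rw [e3, hd, hget]
        simp only [pvAltGo, if_true, hdw, e1, e2]
        rw [pvAltGo_fuel tok (xs.drop j).length (xs.drop (i + 1)).length (xs.drop j) j
          le_rfl hfl]
      · rw [if_pos (by simpa using hx)]
        have hne : xs[i] ≠ tok := by rwa [List.getD_eq_getElem xs 0 h] at hx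
        have e3 : (xs.drop i).length = (xs.drop (i + 1)).length + 1 := by rw [hd]; rfl
        rw [ih (i + 1) (by omega), e3, hd, pvAltGo_cons_ne _ _ _ _ hne]
    · rename_i h
      rw [List.drop_eq_nil_of_le (by omega)]
      cases hq : (List.drop i xs).length <;> rfl

-- ===== VERDICT (by name: the statement is the Claim_ definition above) =====
theorem find_token_runs_py_spec : Claim_equal_find_token_runs_py := by
  intro prompt_ids token_id _
  show find_token_runs_py prompt_ids token_id = find_token_runs_py_alt prompt_ids token_id
  unfold find_token_runs_py find_token_runs_py_alt
  rw [pvOuter_eq_altGo prompt_ids token_id (prompt_ids.length + 1) 0 (by omega)]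
  simp
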